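-- pv_equiv track=rewrite | github.com/Al-Zhukov/yandex_algorithm_2 | 7B/7B_D.py | solution
-- ===== SOURCE A (Python) =====
-- def solution(n, m, kittens, left, right):
--     points = [None] * (2 * n + m)
--     for i in range(n):
--         points[2 * i] = (left[i], '1_left', i)
--         points[2 * i + 1] = (right[i], '3_right', i)
--     for i in range(m):
--         points[2 * n + i] = (kittens[i], '2_kitten')
--     points.sort()
--
--     results = [0] * m
--     kitten_counter = 0
--     for i in range(2 * n + m):
--         if points[i][1] == '1_left':
--             results[points[i][2]] -= kitten_counter
--         elif points[i][1] == '3_right':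
--             results[points[i][2]] += kitten_counter
--         elif points[i][1] == '2_kitten':
--             kitten_counter += 1
--     return results
-- ===== SOURCE B (Python) =====
-- def _bisect(ks, x, strict):
--     # On sorted ks: index of the first element > x (strict=False) or >= x (strict=True),
--     # i.e. the number of elements <= x (resp. < x), by binary search.
--     lo, hi = 0, len(ks)
--     while lo < hi:
--         mid = (lo + hi) // 2
--         if (ks[mid] < x) if strict else (ks[mid] <= x):
--             lo = mid + 1
--         else:
--             hi = mid
--     return lo
--
--
-- def solution(n, m, kittens, left, right):
--     # Sort a copy of the first m kittens once, then answer each interval by two binary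
--     # searches: results[i] = #{kittens <= right[i]} - #{kittens < left[i]} (inclusive ends).
--     # Like A, this raises IndexError when n > m (results[i] with i >= m) or when the
--     # lists are shorter than n/m require.
--     ks = sorted(kittens[:m])
--     results = [0] * m
--     for i in range(n):
--         results[i] = _bisect(ks, right[i], False) - _bisect(ks, left[i], True)
--     return results
-- ===== Notes on version B (the rewrite author's own statement) =====
-- stated objective: alternative
-- what changed: Replaces A's build-event-list/sort/sweep-with-running-counter pass by sorting a copy of the first m kittens once and answering each interval with two hand-rolled binary searches (results[i] = #{kittens <= right[i]} - #{kittens < left[i]}); Pre_ excludes only inputs where A raises (notably n > m, where A's sweep always executes results[i] for some i >= m and raises IndexError; B raises the same way there).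
import Mathlib
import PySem

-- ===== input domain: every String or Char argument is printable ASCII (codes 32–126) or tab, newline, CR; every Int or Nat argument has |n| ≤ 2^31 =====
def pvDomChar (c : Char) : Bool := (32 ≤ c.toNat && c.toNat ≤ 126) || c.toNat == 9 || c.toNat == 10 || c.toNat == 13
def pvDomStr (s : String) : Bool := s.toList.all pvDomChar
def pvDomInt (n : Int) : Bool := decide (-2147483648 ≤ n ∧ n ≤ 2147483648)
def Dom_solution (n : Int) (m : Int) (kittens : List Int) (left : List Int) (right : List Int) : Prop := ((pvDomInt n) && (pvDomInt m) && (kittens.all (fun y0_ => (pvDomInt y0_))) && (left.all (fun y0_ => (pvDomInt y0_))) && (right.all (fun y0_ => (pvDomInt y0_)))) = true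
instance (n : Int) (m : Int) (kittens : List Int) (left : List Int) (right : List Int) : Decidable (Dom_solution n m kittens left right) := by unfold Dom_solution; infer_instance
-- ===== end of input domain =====

-- B replaces A's build-events/sort/sweep-with-counter pass by sorting a copy of the first m
-- kittens once and answering each interval with two hand-rolled binary searches
-- (#kittens ≤ right[i] minus #kittens < left[i]); objective: alternative.

-- ===== PORT A =====
-- Python compares the event tuples (value, tag[, index]) lexicographically; the tag strings are
-- compared as their character lists (exact for these ASCII tags). Kitten events are 2-tuples in
-- Python; since their tag '2_kitten' is unique to them, carrying a constant third component 0
-- yields exactly the same ordering and the same sweep.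
def pvKey (e : Int × String × Int) : Lex (Int × Lex (List Char × Int)) :=
  toLex (e.1, toLex (e.2.1.toList, e.2.2))

-- A fills points[2*i], points[2*i+1] (i < n) and then points[2*n+i] (i < m); for 0 ≤ n, 0 ≤ m
-- (every Pre_ input with n > 0, and n = 0) the filled array is exactly this in-order construction.
-- On the degenerate Pre_ inputs with n < 0 Python's negative-index wraparound leaves an array
-- holding only kitten events; this construction also yields only kitten events there, and either
-- way the sweep below returns the untouched [0]*m.
def pvPoints (n : Int) (m : Int) (kittens : List Int) (left : List Int) (right : List Int) :
    List (Int × String × Int) :=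
  (PySem.List.pyRange 0 n 1).foldl
    (fun acc i => acc ++ [(PySem.List.pyGetD left i 0, "1_left", i),
                          (PySem.List.pyGetD right i 0, "3_right", i)]) []
  ++ (PySem.List.pyRange 0 m 1).foldl
    (fun acc i => acc ++ [(PySem.List.pyGetD kittens i 0, "2_kitten", 0)]) []

-- one iteration of A's sweep loop; the updated index points[i][2] is a nonnegative i < n ≤ m
-- under Pre_, so .toNat / List.set / List.getD are exact for Python's results[...] += / -=.
def pvStep (st : List Int × Int) (p : Int × String × Int) : List Int × Int :=
  if p.2.1 = "1_left" then (st.1.set p.2.2.toNat (st.1.getD p.2.2.toNat 0 - st.2), st.2)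
  else if p.2.1 = "3_right" then (st.1.set p.2.2.toNat (st.1.getD p.2.2.toNat 0 + st.2), st.2)
  else if p.2.1 = "2_kitten" then (st.1, st.2 + 1)
  else st

def solution (n : Int) (m : Int) (kittens : List Int) (left : List Int) (right : List Int) : List Int :=
  let points := PySem.List.sorted (pvPoints n m kittens left right) pvKey
  (points.foldl pvStep (List.replicate m.toNat 0, 0)).1

-- ===== PORT B =====
-- B's _bisect(ks, x, strict): binary search on the sorted copy; ks[mid] is always in range
-- (0 <= mid < hi <= len ks), so getD is exact for Python's ks[mid];
-- the condition "(ks[mid] < x) if strict else (ks[mid] <= x)" is pvPb x strict ks[mid].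
def pvPb (x : Int) (strict : Bool) (k : Int) : Bool :=
  if strict then decide (k < x) else decide (k <= x)

-- the while loop, with a structural fuel = len ks (each step shrinks hi - lo, so it never runs out)
def pvBisectGo (ks : List Int) (x : Int) (strict : Bool) : Nat → Nat → Nat → Nat
  | 0, lo, _ => lo
  | fuel + 1, lo, hi =>
    if lo < hi then
      if pvPb x strict (ks.getD ((lo + hi) / 2) 0) then
        pvBisectGo ks x strict fuel ((lo + hi) / 2 + 1) hi
      else pvBisectGo ks x strict fuel lo ((lo + hi) / 2)
    else lo

def pvBisect (ks : List Int) (x : Int) (strict : Bool) : Nat :=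
  pvBisectGo ks x strict ks.length 0 ks.length

-- results[i] = ... with 0 <= i < n <= len(results) under Pre_, so pySetD is exact for the assignment.
def solution_alt (n : Int) (m : Int) (kittens : List Int) (left : List Int) (right : List Int) : List Int :=
  let ks := PySem.List.sorted (PySem.List.slice kittens none (some m)) (fun k => k)
  (PySem.List.pyRange 0 n 1).foldl
    (fun results i => PySem.List.pySetD results i
      ((pvBisect ks (PySem.List.pyGetD right i 0) false : Int)
        - (pvBisect ks (PySem.List.pyGetD left i 0) true : Int)))
    (List.replicate m.toNat 0)

-- ===== PRECONDITION & SPEC =====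
-- Pre_ is exactly the inputs on which the Python A returns normally; on every excluded input A
-- RAISES (and B raises there too): for n > m the sweep always executes results[i] -= / +=
-- for some left/right index i ≥ m, an IndexError regardless of kitten_counter and of the list
-- lengths; IndexError likewise when left/right are shorter than n or kittens shorter than a
-- positive m; and for n < 0 with 0 > 4n + m a kitten write's negative index falls out of range
-- (or the leftover None entries make the sort raise TypeError).
def Pre_solution (n : Int) (m : Int) (kittens : List Int) (left : List Int) (right : List Int) : Prop :=
  (0 < n → n ≤ m ∧ n ≤ (left.length : Int) ∧ n ≤ (right.length : Int))
    ∧ (0 < m → m ≤ (kittens.length : Int))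
    ∧ (n < 0 → 0 < m → 0 ≤ 4 * n + m)
instance (n : Int) (m : Int) (kittens : List Int) (left : List Int) (right : List Int) : Decidable (Pre_solution n m kittens left right) := by unfold Pre_solution; infer_instance
def pvWitness_solution : Int × Int × List Int × List Int × List Int := (1, 2, [3, 5], [2], [4])
def Spec_solution (n : Int) (m : Int) (kittens : List Int) (left : List Int) (right : List Int) (out : List Int) : Prop := out = solution_alt n m kittens left right
instance (n : Int) (m : Int) (kittens : List Int) (left : List Int) (right : List Int) (out : List Int) : Decidable (Spec_solution n m kittens left right out) := by unfold Spec_solution; infer_instance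

-- ===== CLAIM (what is proved, stated in full; the proofs are below) =====
def Claim_equal_solution : Prop := ∀ (n : Int) (m : Int) (kittens : List Int) (left : List Int) (right : List Int), Dom_solution n m kittens left right → Pre_solution n m kittens left right → Spec_solution n m kittens left right (solution n m kittens left right)

-- ===== LEMMAS AND PROOFS =====

def pvIsKit (p : Int × String × Int) : Bool := p.2.1 == "2_kitten"

-- number of kitten events of l strictly below e in the Python tuple order
def pvK (l : List (Int × String × Int)) (e : Int × String × Int) : Int :=
  ((l.filter (fun q => pvIsKit q && decide (pvKey q < pvKey e))).length : Int)

-- what the sweep adds to results[t] when it processes event e (counter having started at c)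
def pvContrib (l : List (Int × String × Int)) (c : Int) (t : Nat) (e : Int × String × Int) : Int :=
  if e.2.1 = "1_left" ∧ e.2.2.toNat = t then -(c + pvK l e)
  else if e.2.1 = "3_right" ∧ e.2.2.toNat = t then c + pvK l e
  else 0

lemma pvSweep_length (ps : List (Int × String × Int)) (res : List Int) (c : Int) :
    ((ps.foldl pvStep (res, c)).1).length = res.length := by
  induction ps generalizing res c with
  | nil => rfl
  | cons p ps ih =>
    simp only [List.foldl_cons, pvStep]
    split_ifs <;> simp [ih]

lemma pvKey_lt_of_le_of_tag_ne {p e : Int × String × Int} (h : pvKey p ≤ pvKey e)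
    (hne : p.2.1 ≠ e.2.1) : pvKey p < pvKey e := by
  rcases lt_or_eq_of_le h with h' | h'
  · exact h'
  · exfalso
    apply hne
    have : (p.1, toLex (p.2.1.toList, p.2.2)) = (e.1, toLex (e.2.1.toList, e.2.2)) := by
      simpa [pvKey] using h'
    have h2 : (p.2.1.toList, p.2.2) = (e.2.1.toList, e.2.2) := by
      have := congrArg Prod.snd this
      simpa using this
    have : p.2.1.toList = e.2.1.toList := congrArg Prod.fst h2
    exact String.toList_inj.mp this

lemma pvSweep_getD (ps : List (Int × String × Int))
    (hs : ps.Pairwise (fun a b => pvKey a ≤ pvKey b)) (res : List Int) (c : Int) (t : Nat)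
    (ht : t < res.length) :
    ((ps.foldl pvStep (res, c)).1).getD t 0
      = res.getD t 0 + (ps.map (pvContrib ps c t)).sum := by
  induction ps generalizing res c with
  | nil => simp
  | cons p ps ih =>
    rw [List.pairwise_cons] at hs
    obtain ⟨hp, hps⟩ := hs
    -- pvK over (p :: ps) seen from an element e
    have hKcons : ∀ e, pvK (p :: ps) e
        = (if pvIsKit p && decide (pvKey p < pvKey e) then 1 else 0) + pvK ps e := by
      intro e
      simp only [pvK, List.filter_cons]
      split_ifs <;> simp <;> omega
    simp only [List.foldl_cons, List.map_cons, List.sum_cons]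
    by_cases h1 : p.2.1 = "1_left"
    · have hstep : pvStep (res, c) p
          = (res.set p.2.2.toNat (res.getD p.2.2.toNat 0 - c), c) := by
        simp [pvStep, h1]
      rw [hstep, ih hps _ c (by simpa using ht)]
      have hkit : pvIsKit p = false := by simp [pvIsKit, h1]
      have hKsame : ∀ e, pvK (p :: ps) e = pvK ps e := by
        intro e; rw [hKcons e]; simp [hkit]
      have hmap : ps.map (pvContrib (p :: ps) c t) = ps.map (pvContrib ps c t) := by
        apply List.map_congr_left
        intro e _
        simp only [pvContrib, hKsame e]
      rw [hmap]
      -- pvK (p :: ps) p = 0 : nothing sorts strictly below the head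
      have hK0 : pvK (p :: ps) p = 0 := by
        have : (p :: ps).filter (fun q => pvIsKit q && decide (pvKey q < pvKey p)) = [] := by
          rw [List.filter_eq_nil_iff]
          intro q hq
          rcases List.mem_cons.mp hq with rfl | hq'
          · simp [hkit]
          · have := hp q hq'
            simp [not_lt_of_ge this]
        simp [pvK, this]
      have hcon : pvContrib (p :: ps) c t p = if p.2.2.toNat = t then -c else 0 := by
        simp only [pvContrib, h1, hK0, true_and]
        split_ifs with h h' <;> simp_all
      rw [hcon]
      by_cases hut : p.2.2.toNat = t
      · rw [hut]
        have : (res.set t (res.getD t 0 - c)).getD t 0 = res.getD t 0 - c := by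
          simp [List.getD_eq_getElem?_getD, List.getElem?_set_self' , ht]
        rw [this]
        simp only [if_pos trivial]
        ring
      · have : (res.set p.2.2.toNat (res.getD p.2.2.toNat 0 - c)).getD t 0 = res.getD t 0 := by
          simp [List.getD_eq_getElem?_getD, List.getElem?_set_ne (by omega : p.2.2.toNat ≠ t)]
        rw [this]
        simp [hut]
    · by_cases h3 : p.2.1 = "3_right"
      · have hstep : pvStep (res, c) p
            = (res.set p.2.2.toNat (res.getD p.2.2.toNat 0 + c), c) := by
          simp [pvStep, h1, h3]
        rw [hstep, ih hps _ c (by simpa using ht)]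
        have hkit : pvIsKit p = false := by simp [pvIsKit, h3]
        have hKsame : ∀ e, pvK (p :: ps) e = pvK ps e := by
          intro e; rw [hKcons e]; simp [hkit]
        have hmap : ps.map (pvContrib (p :: ps) c t) = ps.map (pvContrib ps c t) := by
          apply List.map_congr_left
          intro e _
          simp only [pvContrib, hKsame e]
        rw [hmap]
        have hK0 : pvK (p :: ps) p = 0 := by
          have : (p :: ps).filter (fun q => pvIsKit q && decide (pvKey q < pvKey p)) = [] := by
            rw [List.filter_eq_nil_iff]
            intro q hq
            rcases List.mem_cons.mp hq with rfl | hq'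
            · simp [hkit]
            · have := hp q hq'
              simp [not_lt_of_ge this]
          simp [pvK, this]
        have hcon : pvContrib (p :: ps) c t p = if p.2.2.toNat = t then c else 0 := by
          simp only [pvContrib, h1, h3, hK0, true_and, false_and, if_false]
          split_ifs with h h' <;> simp_all
        rw [hcon]
        by_cases hut : p.2.2.toNat = t
        · rw [hut]
          have : (res.set t (res.getD t 0 + c)).getD t 0 = res.getD t 0 + c := by
            simp [List.getD_eq_getElem?_getD, List.getElem?_set_self', ht]
          rw [this]
          simp only [if_pos trivial]
          ring
        · have : (res.set p.2.2.toNat (res.getD p.2.2.toNat 0 + c)).getD t 0 = res.getD t 0 := by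
            simp [List.getD_eq_getElem?_getD, List.getElem?_set_ne (by omega : p.2.2.toNat ≠ t)]
          rw [this]
          simp [hut]
      · by_cases h2 : p.2.1 = "2_kitten"
        · have hstep : pvStep (res, c) p = (res, c + 1) := by
            simp [pvStep, h1, h3, h2]
          rw [hstep, ih hps _ (c + 1) ht]
          have hkit : pvIsKit p = true := by simp [pvIsKit, h2]
          have hcon : pvContrib (p :: ps) c t p = 0 := by
            simp [pvContrib, h2]
          rw [hcon]
          have hmap : ps.map (pvContrib (p :: ps) c t) = ps.map (pvContrib ps (c + 1) t) := by
            apply List.map_congr_left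
            intro e he
            by_cases hm1 : e.2.1 = "1_left" ∧ e.2.2.toNat = t
            · have hlt : pvKey p < pvKey e :=
                pvKey_lt_of_le_of_tag_ne (hp e he) (by rw [h2, hm1.1]; decide)
              simp only [pvContrib, hm1.1, hm1.2, true_and, if_true, hKcons e, hkit, hlt]
              simp
              ring
            · by_cases hm3 : e.2.1 = "3_right" ∧ e.2.2.toNat = t
              · have hlt : pvKey p < pvKey e :=
                  pvKey_lt_of_le_of_tag_ne (hp e he) (by rw [h2, hm3.1]; decide)
                simp only [pvContrib, hm1, hm3, hm3.1, hm3.2, true_and, if_false, if_true,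
                  hKcons e, hkit, hlt]
                simp
                ring
              · simp [pvContrib, hm1, hm3]
          rw [hmap]
          ring
        · have hstep : pvStep (res, c) p = (res, c) := by
            simp [pvStep, h1, h3, h2]
          rw [hstep, ih hps _ c ht]
          have hkit : pvIsKit p = false := by simp [pvIsKit, h2]
          have hKsame : ∀ e, pvK (p :: ps) e = pvK ps e := by
            intro e; rw [hKcons e]; simp [hkit]
          have hcon : pvContrib (p :: ps) c t p = 0 := by
            simp [pvContrib, h1, h3]
          have hmap : ps.map (pvContrib (p :: ps) c t) = ps.map (pvContrib ps c t) := by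
            apply List.map_congr_left
            intro e _
            simp only [pvContrib, hKsame e]
          rw [hmap, hcon]
          ring

-- sum over range with at most one nonzero index
lemma pvSum_single (f : Nat → Int) (nn t : Nat) (ht : t < nn)
    (h0 : ∀ j, j < nn → j ≠ t → f j = 0) : ((List.range nn).map f).sum = f t := by
  induction nn with
  | zero => omega
  | succ k ih =>
    rw [List.range_succ]
    by_cases hk : t = k
    · subst hk
      have : ((List.range t).map f).sum = 0 := by
        apply List.sum_eq_zero
        intro x hx
        simp only [List.mem_map, List.mem_range] at hx
        obtain ⟨j, hj, rfl⟩ := hx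
        exact h0 j (by omega) (by omega)
      simp [this]
    · have h := ih (by omega) (fun j hj hne => h0 j (by omega) hne)
      simp [h, h0 k (by omega) (Ne.symm hk)]

lemma pvKitLtLeft (k l x : Int) : pvKey (k, "2_kitten", 0) < pvKey (l, "1_left", x) ↔ k < l := by
  have hne : ¬("2_kitten".toList < "1_left".toList) := by decide
  have hne2 : "2_kitten".toList ≠ "1_left".toList := by decide
  simp only [pvKey, Prod.Lex.lt_iff, ofLex_toLex]
  constructor
  · rintro (h | ⟨-, h | ⟨h, -⟩⟩)
    · exact h
    · exact absurd h hne
    · exact absurd h hne2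
  · exact fun h => Or.inl h

lemma pvKitLtRight (k r x : Int) : pvKey (k, "2_kitten", 0) < pvKey (r, "3_right", x) ↔ k ≤ r := by
  have hlt : "2_kitten".toList < "3_right".toList := by decide
  simp only [pvKey, Prod.Lex.lt_iff, ofLex_toLex]
  constructor
  · rintro (h | ⟨h, -⟩)
    · exact le_of_lt h
    · exact le_of_eq h
  · intro h
    rcases lt_or_eq_of_le h with h' | h'
    · exact Or.inl h'
    · exact Or.inr ⟨h', Or.inl hlt⟩

lemma pvPoints_split (n m : Int) (kittens left right : List Int) :
    pvPoints n m kittens left right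
      = ((PySem.List.pyRange 0 n 1).flatMap
          (fun i => [(PySem.List.pyGetD left i 0, "1_left", i),
                     (PySem.List.pyGetD right i 0, "3_right", i)]))
        ++ (PySem.List.pyRange 0 m 1).map
          (fun i => (PySem.List.pyGetD kittens i 0, "2_kitten", 0)) := by
  rw [pvPoints, PySem.List.foldl_append_eq_flatMap, PySem.List.foldl_append_singleton_eq_map]
  simp

lemma pvMap_take (m : Int) (kittens : List Int) (hm : 0 ≤ m) (hk : m ≤ (kittens.length : Int)) :
    (PySem.List.pyRange 0 m 1).map (fun i => PySem.List.pyGetD kittens i 0)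
      = kittens.take m.toNat := by
  apply List.ext_getElem
  · simp [PySem.List.length_pyRange_one]
    omega
  · intro i h1 h2
    have him : i < m.toNat := by
      simpa [PySem.List.length_pyRange_one] using h1
    have hlen : i < kittens.length := by omega
    simp [PySem.List.getElem_pyRange_one, List.getD_eq_getElem?_getD,
      List.getElem?_eq_getElem hlen]

lemma pvK_points (n m : Int) (kittens left right : List Int) (hm : 0 ≤ m)
    (hk : m ≤ (kittens.length : Int)) (e : Int × String × Int) :
    pvK (pvPoints n m kittens left right) e
      = (((kittens.take m.toNat).filter
            (fun k => pvIsKit (k, "2_kitten", 0) && decide (pvKey (k, "2_kitten", 0) < pvKey e))).length : Int) := by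
  rw [pvK, pvPoints_split, List.filter_append, List.length_append]
  have hLR : ((PySem.List.pyRange 0 n 1).flatMap
      (fun i => [(PySem.List.pyGetD left i 0, "1_left", i),
                 (PySem.List.pyGetD right i 0, "3_right", i)])).filter
        (fun q => pvIsKit q && decide (pvKey q < pvKey e)) = [] := by
    rw [List.filter_eq_nil_iff]
    intro q hq
    rw [List.mem_flatMap] at hq
    obtain ⟨i, -, hqi⟩ := hq
    simp only [List.mem_cons, List.mem_singleton, List.not_mem_nil, or_false] at hqi
    rcases hqi with rfl | rfl <;> simp [pvIsKit]
  rw [hLR, ← pvMap_take m kittens hm hk, List.filter_map, List.filter_map,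
    List.length_map, List.length_map]
  have : ((fun q => pvIsKit q && decide (pvKey q < pvKey e)) ∘
        fun i => ((PySem.List.pyGetD kittens i 0 : Int), ("2_kitten" : String), (0 : Int)))
      = ((fun k => pvIsKit (k, "2_kitten", 0) && decide (pvKey (k, "2_kitten", 0) < pvKey e)) ∘
        fun i => PySem.List.pyGetD kittens i 0) := by
    funext i; rfl
  rw [this]
  simp

lemma pvSum_pairs (l : List Int) (f : Int × String × Int → Int)
    (g h : Int → Int × String × Int) :
    ((l.flatMap (fun i => [g i, h i])).map f).sum = (l.map (fun i => f (g i) + f (h i))).sum := by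
  induction l with
  | nil => rfl
  | cons a l ih => simp [ih]; ring

lemma pvA_getD (n m : Int) (kittens left right : List Int)
    (hn0 : 0 ≤ n) (hnm : n ≤ m) (hkm : m ≤ (kittens.length : Int)) (t : Nat)
    (ht : t < m.toNat) :
    ((PySem.List.sorted (pvPoints n m kittens left right) pvKey).foldl pvStep
        (List.replicate m.toNat 0, 0)).1.getD t 0
      = if t < n.toNat then
          (((kittens.take m.toNat).filter
              (fun k => decide (k ≤ PySem.List.pyGetD right (t : Int) 0))).length : Int)
            - (((kittens.take m.toNat).filter
              (fun k => decide (k < PySem.List.pyGetD left (t : Int) 0))).length : Int)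
        else 0 := by
  have hm0 : 0 ≤ m := le_trans hn0 hnm
  set pts := pvPoints n m kittens left right with hpts
  have hperm : (PySem.List.sorted pts pvKey).Perm pts := PySem.List.sorted_perm pts pvKey false
  have hpair := PySem.List.sorted_pairwise pts pvKey
  rw [pvSweep_getD _ hpair _ 0 t (by simpa using ht)]
  have hgd0 : (List.replicate m.toNat (0 : Int)).getD t 0 = 0 := by
    simp [List.getD_eq_getElem?_getD, List.getElem?_replicate, ht]
  rw [hgd0, zero_add]
  -- replace the list argument of pvContrib by pts (pvK is permutation-invariant)
  have hKeq : ∀ e, pvK (PySem.List.sorted pts pvKey) e = pvK pts e := by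
    intro e
    unfold pvK
    rw [(hperm.filter _).length_eq]
  have hmc : (PySem.List.sorted pts pvKey).map (pvContrib (PySem.List.sorted pts pvKey) 0 t)
      = (PySem.List.sorted pts pvKey).map (pvContrib pts 0 t) := by
    apply List.map_congr_left
    intro e _
    simp only [pvContrib, hKeq e]
  rw [hmc, (hperm.map (pvContrib pts 0 t)).sum_eq]
  -- split the event list
  nth_rewrite 2 [hpts]
  rw [pvPoints_split]
  rw [List.map_append, List.sum_append]
  -- the kitten events contribute nothing
  have hKT : (((PySem.List.pyRange 0 m 1).map
      (fun i => ((PySem.List.pyGetD kittens i 0 : Int), ("2_kitten" : String), (0 : Int)))).map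
        (pvContrib pts 0 t)).sum = 0 := by
    apply List.sum_eq_zero
    intro x hx
    simp only [List.map_map, List.mem_map] at hx
    obtain ⟨i, -, rfl⟩ := hx
    simp [pvContrib]
  rw [hKT, add_zero]
  -- the left/right events: one surviving index
  rw [pvSum_pairs, PySem.List.pyRange_one]
  simp only [Int.sub_zero, List.map_map]
  have harg : ∀ j : Nat, ((fun i => pvContrib pts 0 t (PySem.List.pyGetD left i 0, "1_left", i)
        + pvContrib pts 0 t (PySem.List.pyGetD right i 0, "3_right", i)) ∘ fun k : Nat => (0 : Int) + k) j
      = pvContrib pts 0 t (PySem.List.pyGetD left (j : Int) 0, "1_left", (j : Int))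
        + pvContrib pts 0 t (PySem.List.pyGetD right (j : Int) 0, "3_right", (j : Int)) := by
    intro j
    simp
  have hzero : ∀ j : Nat, j ≠ t →
      pvContrib pts 0 t (PySem.List.pyGetD left (j : Int) 0, "1_left", (j : Int))
        + pvContrib pts 0 t (PySem.List.pyGetD right (j : Int) 0, "3_right", (j : Int)) = 0 := by
    intro j hj
    simp [pvContrib, hj]
  by_cases htn : t < n.toNat
  · rw [if_pos htn]
    rw [pvSum_single _ n.toNat t htn (by
      intro j hj hne
      rw [harg j]
      exact hzero j hne)]
    rw [harg t]
    have htt : ((t : Int)).toNat = t := by omega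
    have hL : pvContrib pts 0 t (PySem.List.pyGetD left (t : Int) 0, "1_left", (t : Int))
        = -(pvK pts (PySem.List.pyGetD left (t : Int) 0, "1_left", (t : Int))) := by
      simp [pvContrib, htt]
    have hR : pvContrib pts 0 t (PySem.List.pyGetD right (t : Int) 0, "3_right", (t : Int))
        = pvK pts (PySem.List.pyGetD right (t : Int) 0, "3_right", (t : Int)) := by
      simp [pvContrib, htt]
    rw [hL, hR, hpts, pvK_points n m kittens left right hm0 hkm,
      pvK_points n m kittens left right hm0 hkm]
    have hfl : ∀ l : Int, (fun k => pvIsKit ((k : Int), ("2_kitten" : String), (0 : Int))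
          && decide (pvKey (k, "2_kitten", 0) < pvKey (l, "1_left", (t : Int))))
        = (fun k => decide (k < l)) := by
      intro l
      funext k
      simp [pvIsKit, pvKitLtLeft]
    have hfr : ∀ r : Int, (fun k => pvIsKit ((k : Int), ("2_kitten" : String), (0 : Int))
          && decide (pvKey (k, "2_kitten", 0) < pvKey (r, "3_right", (t : Int))))
        = (fun k => decide (k ≤ r)) := by
      intro r
      funext k
      simp [pvIsKit, pvKitLtRight]
    rw [hfl, hfr]
    ring
  · rw [if_neg htn]
    apply List.sum_eq_zero
    intro x hx
    simp only [List.mem_map, List.mem_range] at hx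
    obtain ⟨j, hj, rfl⟩ := hx
    rw [harg j]
    exact hzero j (by omega)

lemma pvSweep_all_kittens (ps : List (Int × String × Int))
    (h : ∀ p ∈ ps, p.2.1 = "2_kitten") :
    ∀ (res : List Int) (c : Int), ((ps.foldl pvStep (res, c)).1) = res := by
  induction ps with
  | nil => intro res c; rfl
  | cons p ps ih =>
    intro res c
    have hp := h p (List.mem_cons_self ..)
    have hstep : pvStep (res, c) p = (res, c + 1) := by
      simp [pvStep, hp]
    rw [List.foldl_cons, hstep, ih (fun q hq => h q (List.mem_cons_of_mem _ hq))]

lemma pvB_foldl (F : Int → Int) : ∀ (nn : Nat) (res : List Int), nn ≤ res.length →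
    (PySem.List.pyRange 0 (nn : Int) 1).foldl
        (fun r i => PySem.List.pySetD r i (F i)) res
      = (PySem.List.pyRange 0 (nn : Int) 1).map F ++ res.drop nn := by
  intro nn
  induction nn with
  | zero =>
    intro res _
    rw [show ((0 : Nat) : Int) = 0 by rfl, PySem.List.pyRange_one_eq_nil (le_refl 0)]
    simp
  | succ k ih =>
    intro res hlen
    have hcast : ((k + 1 : Nat) : Int) = (k : Int) + 1 := by push_cast; ring
    rw [hcast, PySem.List.pyRange_one_succ_right (by positivity), List.foldl_append,
      ih res (by omega), List.map_append]
    have hmlen : ((PySem.List.pyRange 0 (k : Int) 1).map F).length = k := by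
      simp [PySem.List.length_pyRange_one]
    have hdrop : res.drop k = res[k] :: res.drop (k + 1) :=
      List.drop_eq_getElem_cons (by omega)
    simp only [List.foldl_cons, List.foldl_nil, PySem.List.pySetD_natCast]
    rw [hdrop]
    rw [List.set_append_right _ _ (by omega)]
    simp [hmlen]
    rw [hdrop]
    simp only [List.set_cons_zero]


lemma pvPb_mono {x : Int} {strict : Bool} {a b : Int} (hab : a ≤ b)
    (h : pvPb x strict b = true) : pvPb x strict a = true := by
  unfold pvPb at *
  split_ifs at * <;> simp_all <;> omega

lemma pvCountP_split (ks : List Int) (p : Int → Bool) (lo : Nat) (hlo : lo ≤ ks.length)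
    (h : ∀ (j : Nat) (hj : j < ks.length), p ks[j] = true ↔ j < lo) :
    ks.countP p = lo := by
  conv_lhs => rw [← List.take_append_drop lo ks]
  rw [List.countP_append]
  have h1 : (ks.take lo).countP p = lo := by
    rw [List.countP_eq_length.mpr, List.length_take]
    · omega
    · intro a ha
      obtain ⟨i, hi, rfl⟩ := List.getElem_of_mem ha
      have hi' : i < lo := by simp [List.length_take] at hi; omega
      have : (ks.take lo)[i] = ks[i]'(by simp at hi; omega) := List.getElem_take
      rw [this]
      exact (h i _).mpr hi'
  have h2 : (ks.drop lo).countP p = 0 := by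
    rw [List.countP_eq_zero]
    intro a ha
    obtain ⟨i, hi, rfl⟩ := List.getElem_of_mem ha
    have : (ks.drop lo)[i] = ks[lo + i]'(by simp at hi; omega) := List.getElem_drop
    rw [this]
    simp only [h (lo + i) _]
    omega
  omega

lemma pvBisectGo_count (ks : List Int) (x : Int) (strict : Bool)
    (hs : ks.Pairwise (· ≤ ·)) :
    ∀ (d lo hi : Nat), hi - lo ≤ d → lo ≤ hi → hi ≤ ks.length →
    (∀ (j : Nat) (hj : j < ks.length), j < lo → pvPb x strict ks[j] = true) →
    (∀ (j : Nat) (hj : j < ks.length), hi ≤ j → pvPb x strict ks[j] = false) →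
    pvBisectGo ks x strict d lo hi = ks.countP (pvPb x strict) := by
  have hmono : ∀ (i j : Nat) (hi : i < ks.length) (hj : j < ks.length), i ≤ j → ks[i] ≤ ks[j] := by
    intro i j hi hj hij
    rcases Nat.lt_or_ge i j with h | h
    · exact List.pairwise_iff_getElem.mp hs i j hi hj h
    · have : i = j := by omega
      subst this
      rfl
  intro d
  induction d with
  | zero =>
    intro lo hi h0 h1 h2 hL hH
    have heq : hi = lo := by omega
    subst heq
    show hi = _
    refine (pvCountP_split ks _ hi h2 ?_).symm
    intro j hj
    constructor
    · intro hp
      by_contra hge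
      have := hH j hj (by omega)
      simp_all
    · exact fun hlt => hL j hj hlt
  | succ d ih =>
    intro lo hi hle hlohi hhi hL hH
    show (if lo < hi then _ else lo) = _
    by_cases h : lo < hi
    · rw [if_pos h]
      have hmidlt : (lo + hi) / 2 < hi := by omega
      have hmidge : lo ≤ (lo + hi) / 2 := by omega
      have hmidlen : (lo + hi) / 2 < ks.length := by omega
      have hgd : ks.getD ((lo + hi) / 2) 0 = ks[(lo + hi) / 2] :=
        List.getD_eq_getElem ks 0 hmidlen
      by_cases hp : pvPb x strict (ks.getD ((lo + hi) / 2) 0) = true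
      · rw [if_pos hp]
        apply ih ((lo + hi) / 2 + 1) hi (by omega) (by omega) hhi
        · intro j hj hjlt
          have hple : ks[j] ≤ ks[(lo + hi) / 2] := hmono j _ hj hmidlen (by omega)
          exact pvPb_mono hple (by rwa [hgd] at hp)
        · exact hH
      · rw [if_neg hp]
        apply ih lo ((lo + hi) / 2) (by omega) (by omega) (by omega) hL
        intro j hj hjge
        rcases Nat.lt_or_ge j hi with hjhi | hjhi
        · have hple : ks[(lo + hi) / 2] ≤ ks[j] := hmono _ j hmidlen hj hjge
          by_contra habs
          simp only [Bool.not_eq_false] at habs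
          exact hp (by rw [hgd]; exact pvPb_mono hple habs)
        · exact hH j hj hjhi
    · rw [if_neg h]
      have heq : hi = lo := by omega
      subst heq
      refine (pvCountP_split ks _ hi hhi ?_).symm
      intro j hj
      constructor
      · intro hp
        by_contra hge
        have := hH j hj (by omega)
        simp_all
      · exact fun hlt => hL j hj hlt

lemma pvBisect_count (ks : List Int) (x : Int) (strict : Bool)
    (hs : ks.Pairwise (· ≤ ·)) :
    pvBisect ks x strict = ks.countP (pvPb x strict) := by
  apply pvBisectGo_count ks x strict hs ks.length 0 ks.length (by omega) (by omega) (le_refl _)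
  · intro j hj hjlt
    omega
  · intro j hj hjge
    omega

lemma pvPb_false (x : Int) : pvPb x false = fun k => decide (k ≤ x) := rfl

lemma pvPb_true (x : Int) : pvPb x true = fun k => decide (k < x) := rfl

lemma pvBisect_take (mm : Nat) (kittens : List Int) (x : Int) (strict : Bool) :
    (pvBisect (PySem.List.sorted (kittens.take mm) (fun k => k)) x strict : Int)
      = (((kittens.take mm).filter (pvPb x strict)).length : Int) := by
  have hpair : (PySem.List.sorted (kittens.take mm) (fun k => k)).Pairwise (· ≤ ·) := by
    simpa using PySem.List.sorted_pairwise (kittens.take mm) (fun k => k)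
  have hperm := PySem.List.sorted_perm (kittens.take mm) (fun k => k) false
  rw [pvBisect_count _ x strict hpair, List.countP_eq_length_filter, (hperm.filter _).length_eq]

theorem solution_spec : Claim_equal_solution := by
  intro n m kittens left right hdom hpre
  obtain ⟨hpos, hkm', hneg⟩ := hpre
  show solution n m kittens left right = solution_alt n m kittens left right
  simp only [solution, solution_alt]
  by_cases hn : 0 < n
  · -- the genuine case: n intervals, first m kittens
    obtain ⟨hnm, hln, hrn⟩ := hpos hn
    have hn0 : 0 ≤ n := le_of_lt hn
    have hm0 : 0 ≤ m := le_trans hn0 hnm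
    have hkm : m ≤ (kittens.length : Int) := hkm' (lt_of_lt_of_le hn hnm)
    simp only [PySem.List.slice_to kittens hm0]
    rw [show n = (n.toNat : Int) by omega]
    rw [pvB_foldl _ n.toNat (List.replicate m.toNat 0) (by simp; omega),
      List.drop_replicate]
    have hlenA : ((PySem.List.sorted (pvPoints n m kittens left right) pvKey).foldl pvStep
        (List.replicate m.toNat 0, 0)).1.length = m.toNat := by
      rw [pvSweep_length]; simp
    rw [show ((n.toNat : Int)) = n by omega] at *
    apply List.ext_getElem
    · simp [hlenA, PySem.List.length_pyRange_one]
      omega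
    · intro t h1 h2
      have htm : t < m.toNat := by rwa [hlenA] at h1
      have hA : _ = _ := pvA_getD n m kittens left right hn0 hnm hkm t htm
      rw [← List.getD_eq_getElem _ 0 h1, hA]
      by_cases htn : t < n.toNat
      · rw [if_pos htn]
        rw [List.getElem_append_left (by simp [PySem.List.length_pyRange_one]; omega)]
        rw [List.getElem_map]
        rw [PySem.List.getElem_pyRange_one]
        simp [pvBisect_take, pvPb_false, pvPb_true]
      · rw [if_neg htn]
        rw [List.getElem_append_right (by simp [PySem.List.length_pyRange_one]; omega)]
        simp
  · -- degenerate n ≤ 0: no interval events, the sweep and the loop both leave [0]*m untouched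
    have hn0 : n ≤ 0 := le_of_not_gt hn
    have hnil : PySem.List.pyRange 0 n 1 = [] := PySem.List.pyRange_one_eq_nil hn0
    have hpts : pvPoints n m kittens left right
        = (PySem.List.pyRange 0 m 1).map
            (fun i => ((PySem.List.pyGetD kittens i 0 : Int), ("2_kitten" : String), (0 : Int))) := by
      rw [pvPoints_split, hnil]
      simp
    rw [hpts, hnil]
    simp only [List.foldl_nil]
    apply pvSweep_all_kittens
    intro p hp
    rw [PySem.List.mem_sorted] at hp
    rw [List.mem_map] at hp
    obtain ⟨i, -, rfl⟩ := hp
    rfl
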